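-- pv_equiv track=rewrite | github.com/gbechtold/Velocitytree | velocitytree/progress_tracking.py | _prioritize_risk_factors
-- ===== SOURCE A (Python) =====
-- from typing import Dict, List, Optional, Tuple, Set
-- from collections import defaultdict
--
-- def _prioritize_risk_factors(risk_factors: List[str]) -> List[str]:
--     """Prioritize and deduplicate risk factors."""
--     # Count occurrences
--     factor_counts = defaultdict(int)
--     for factor in risk_factors:
--         factor_counts[factor] += 1
--
--     # Sort by frequency and severity
--     priority_order = {
--         "Blocked by": 3,
--         "High complexity": 2,
--         "Complex dependency": 2,
--         "High velocity variance": 1,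
--         "Stale progress": 1
--     }
--
--     def get_priority(factor):
--         for key, priority in priority_order.items():
--             if key in factor:
--                 return priority
--         return 0
--
--     sorted_factors = sorted(
--         factor_counts.items(),
--         key=lambda x: (get_priority(x[0]), x[1]),
--         reverse=True
--     )
--
--     return [f"{factor} ({count} features)" for factor, count in sorted_factors[:5]]
-- ===== SOURCE B (Python) =====
-- from typing import List
-- from collections import Counter
--
--
-- def _priority(factor: str) -> int:
--     if "Blocked by" in factor:
--         return 3
--     if "High complexity" in factor or "Complex dependency" in factor:
--         return 2
--     if "High velocity variance" in factor or "Stale progress" in factor: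
--         return 1
--     return 0
--
--
-- def _prioritize_risk_factors(risk_factors: List[str]) -> List[str]:
--     """Prioritize and deduplicate risk factors (bucket selection by priority tier)."""
--     counts = Counter(risk_factors)
--     ordered = []
--     for tier in (3, 2, 1, 0):
--         bucket = [item for item in counts.items() if _priority(item[0]) == tier]
--         bucket.sort(key=lambda item: item[1], reverse=True)
--         ordered += bucket
--     return [f"{factor} ({count} features)" for factor, count in ordered[:5]]
-- ===== Notes on version B (the rewrite author's own statement) =====
-- stated objective: alternative
-- what changed: Replaces the single full sort of counted factors under the tuple key (priority, count) by a four-bucket pass: the distinct factors are partitioned by priority tier (3,2,1,0) and each bucket is stably sorted by count descending, then the buckets are concatenated and the top 5 formatted.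
import Mathlib
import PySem

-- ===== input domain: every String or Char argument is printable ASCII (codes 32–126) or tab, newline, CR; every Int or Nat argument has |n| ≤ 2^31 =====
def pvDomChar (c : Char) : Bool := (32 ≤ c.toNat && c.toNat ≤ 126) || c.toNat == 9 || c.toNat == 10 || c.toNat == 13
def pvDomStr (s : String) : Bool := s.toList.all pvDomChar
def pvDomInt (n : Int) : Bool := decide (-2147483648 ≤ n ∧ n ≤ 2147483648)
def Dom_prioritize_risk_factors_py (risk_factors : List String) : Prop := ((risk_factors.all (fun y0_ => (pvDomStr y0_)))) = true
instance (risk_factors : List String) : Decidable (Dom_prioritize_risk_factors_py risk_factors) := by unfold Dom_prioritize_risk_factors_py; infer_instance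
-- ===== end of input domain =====

-- B replaces A's full sort of the counted factors under the tuple key (priority, count) by a
-- bucket pass: one count-sorted bucket per priority tier 3,2,1,0, concatenated; same output.

-- ===== PORT A =====
-- priority_order.items(), in dict insertion order
def priorityOrderA : List (String × Int) :=
  [("Blocked by", 3), ("High complexity", 2), ("Complex dependency", 2),
   ("High velocity variance", 1), ("Stale progress", 1)]

-- get_priority: first key that is a substring of factor wins ('key in factor')
def getPriorityA_go : List (String × Int) → String → Int
  | [], _ => 0
  | (k, p) :: rest, factor => if PySem.Str.isIn k factor then p else getPriorityA_go rest factor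

def getPriorityA (factor : String) : Int := getPriorityA_go priorityOrderA factor

def prioritize_risk_factors_py (risk_factors : List String) : List String :=
  let factor_counts := risk_factors.foldl (fun d f => d.modify f 0 (· + 1)) (PySem.Dict.empty : PySem.Dict String Int)
  let sorted_factors := PySem.List.sorted2 factor_counts.items (fun x => getPriorityA x.1) (fun x => x.2) true
  (sorted_factors.take 5).map (fun x => x.1 ++ " (" ++ PySem.Int.toStr x.2 ++ " features)")

-- ===== PORT B =====
def getPriorityB (factor : String) : Int :=
  if PySem.Str.isIn "Blocked by" factor then 3
  else if PySem.Str.isIn "High complexity" factor || PySem.Str.isIn "Complex dependency" factor then 2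
  else if PySem.Str.isIn "High velocity variance" factor || PySem.Str.isIn "Stale progress" factor then 1
  else 0

def prioritize_risk_factors_py_alt (risk_factors : List String) : List String :=
  let counts := PySem.Dict.counter risk_factors
  let ordered := ([3, 2, 1, 0] : List Int).foldl
    (fun acc tier =>
      acc ++ PySem.List.sorted (counts.items.filter (fun item => getPriorityB item.1 == tier))
              (fun item => item.2) true) []
  (ordered.take 5).map (fun x => x.1 ++ " (" ++ PySem.Int.toStr x.2 ++ " features)")

-- ===== PRECONDITION & SPEC =====
def Spec_prioritize_risk_factors_py (risk_factors : List String) (out : List String) : Prop := out = prioritize_risk_factors_py_alt risk_factors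
instance (risk_factors : List String) (out : List String) : Decidable (Spec_prioritize_risk_factors_py risk_factors out) := by unfold Spec_prioritize_risk_factors_py; infer_instance

-- ===== CLAIM (what is proved, stated in full; the proofs are below) =====
def Claim_equal_prioritize_risk_factors_py : Prop := ∀ (risk_factors : List String), Dom_prioritize_risk_factors_py risk_factors → Spec_prioritize_risk_factors_py risk_factors (prioritize_risk_factors_py risk_factors)

-- ===== LEMMAS AND PROOFS =====

-- the two priority helpers agree
theorem gp_eq : getPriorityA = getPriorityB := by
  funext f
  simp only [getPriorityA, getPriorityA_go, priorityOrderA, getPriorityB]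
  split_ifs <;> simp_all

-- inserting x into l1 ++ l2 ++ l3 where x never goes before l1, always before l3,
-- and behaves like before' on l2, inserts into l2
theorem insertBy_nil {α : Type} (before : α → α → Bool) (x : α) :
    PySem.List.insertBy before x [] = [x] := rfl

theorem insertBy_cons {α : Type} (before : α → α → Bool) (x y : α) (ys : List α) :
    PySem.List.insertBy before x (y :: ys) =
      if before x y then x :: y :: ys else y :: PySem.List.insertBy before x ys := rfl

theorem insertBy_split {α : Type} (before before' : α → α → Bool) (x : α) (l1 l2 l3 : List α)
    (h1 : ∀ y ∈ l1, before x y = false)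
    (h2 : ∀ y ∈ l2, before x y = before' x y)
    (h3 : ∀ y ∈ l3, before x y = true) :
    PySem.List.insertBy before x (l1 ++ l2 ++ l3) =
      l1 ++ PySem.List.insertBy before' x l2 ++ l3 := by
  induction l1 with
  | nil =>
    simp only [List.nil_append]
    induction l2 with
    | nil =>
      simp only [List.nil_append, insertBy_nil]
      cases l3 with
      | nil => rfl
      | cons y ys => simp [insertBy_cons, h3 y (by simp)]
    | cons y l2 ih =>
      have hy := h2 y (by simp)
      simp only [List.cons_append, insertBy_cons, hy]
      cases hb : before' x y with
      | true => simp
      | false =>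
        simp only [Bool.false_eq_true, if_false, List.cons_append]
        rw [ih (fun z hz => h2 z (by simp [hz]))]
  | cons y l1 ih =>
    have hy := h1 y (by simp)
    have ih' := ih (fun z hz => h1 z (by simp [hz]))
    simp only [List.cons_append, insertBy_cons, hy, Bool.false_eq_true, if_false]
    simp only [List.append_assoc] at ih' ⊢
    rw [ih']

-- appending one element to a reverse-sorted list is one insertion
theorem sorted_rev_append_singleton {α : Type} (xs : List α) (x : α) (k : α → Int) :
    PySem.List.sorted (xs ++ [x]) k true =
      PySem.List.insertBy (fun a b => decide (k b < k a)) x (PySem.List.sorted xs k true) := by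
  rw [PySem.List.sorted_rev_eq_foldl_insertBy, PySem.List.sorted_rev_eq_foldl_insertBy,
    List.foldl_append]
  rfl

-- a lex sort (reverse) by (k1, k2) with k1 ∈ {3,2,1,0} is four count-sorted buckets
theorem sorted2_buckets {α : Type} (xs : List α) (k1 k2 : α → Int)
    (h : ∀ x ∈ xs, k1 x = 3 ∨ k1 x = 2 ∨ k1 x = 1 ∨ k1 x = 0) :
    PySem.List.sorted2 xs k1 k2 true =
      PySem.List.sorted (xs.filter (fun x => k1 x == 3)) k2 true ++
      (PySem.List.sorted (xs.filter (fun x => k1 x == 2)) k2 true ++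
      (PySem.List.sorted (xs.filter (fun x => k1 x == 1)) k2 true ++
      PySem.List.sorted (xs.filter (fun x => k1 x == 0)) k2 true)) := by
  induction xs using List.reverseRecOn with
  | nil => simp [PySem.List.sorted2, PySem.List.sorted]
  | append_singleton xs x ih =>
    have hx := h x (by simp)
    have hxs : ∀ y ∈ xs, k1 y = 3 ∨ k1 y = 2 ∨ k1 y = 1 ∨ k1 y = 0 :=
      fun y hy => h y (by simp [hy])
    have hstep : PySem.List.sorted2 (xs ++ [x]) k1 k2 true =
        PySem.List.insertBy
          (fun a b => decide (k1 b < k1 a) || (!decide (k1 a < k1 b) && decide (k2 b < k2 a)))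
          x (PySem.List.sorted2 xs k1 k2 true) := by
      simp only [PySem.List.sorted2, List.foldl_append, List.foldl_cons, List.foldl_nil, if_true]
    have hmem : ∀ (v : Int) (y : α),
        y ∈ PySem.List.sorted (xs.filter (fun z => k1 z == v)) k2 true → k1 y = v := by
      intro v y hy
      rw [PySem.List.mem_sorted] at hy
      have := List.of_mem_filter hy
      simpa using this
    have hfil : ∀ w : Int, List.filter (fun z => k1 z == w) (xs ++ [x]) =
        List.filter (fun z => k1 z == w) xs ++ (if k1 x == w then [x] else []) := by
      intro w; simp [List.filter_append, List.filter_cons]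
    rw [hstep, ih hxs]
    rcases hx with hv | hv | hv | hv
    · -- k1 x = 3 : insert into the first bucket
      rw [hfil 3, hfil 2, hfil 1, hfil 0]
      simp only [hv]
      norm_num
      rw [sorted_rev_append_singleton]
      have := insertBy_split
        (fun a b => decide (k1 b < k1 a) || (!decide (k1 a < k1 b) && decide (k2 b < k2 a)))
        (fun a b => decide (k2 b < k2 a)) x
        []
        (PySem.List.sorted (List.filter (fun z => k1 z == 3) xs) k2 true)
        (PySem.List.sorted (List.filter (fun z => k1 z == 2) xs) k2 true ++
         (PySem.List.sorted (List.filter (fun z => k1 z == 1) xs) k2 true ++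
          PySem.List.sorted (List.filter (fun z => k1 z == 0) xs) k2 true))
        (by simp)
        (by intro y hy; have := hmem 3 y hy; simp [hv, this])
        (by intro y hy
            simp only [List.mem_append] at hy
            rcases hy with hy | hy | hy
            · have := hmem 2 y hy; simp [hv, this]
            · have := hmem 1 y hy; simp [hv, this]
            · have := hmem 0 y hy; simp [hv, this])
      simpa using this
    · -- k1 x = 2 : insert into the second bucket
      rw [hfil 3, hfil 2, hfil 1, hfil 0]
      simp only [hv]
      norm_num
      rw [sorted_rev_append_singleton]
      have := insertBy_split
        (fun a b => decide (k1 b < k1 a) || (!decide (k1 a < k1 b) && decide (k2 b < k2 a)))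
        (fun a b => decide (k2 b < k2 a)) x
        (PySem.List.sorted (List.filter (fun z => k1 z == 3) xs) k2 true)
        (PySem.List.sorted (List.filter (fun z => k1 z == 2) xs) k2 true)
        (PySem.List.sorted (List.filter (fun z => k1 z == 1) xs) k2 true ++
         PySem.List.sorted (List.filter (fun z => k1 z == 0) xs) k2 true)
        (by intro y hy; have := hmem 3 y hy; simp [hv, this])
        (by intro y hy; have := hmem 2 y hy; simp [hv, this])
        (by intro y hy
            simp only [List.mem_append] at hy
            rcases hy with hy | hy
            · have := hmem 1 y hy; simp [hv, this]
            · have := hmem 0 y hy; simp [hv, this])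
      simpa [List.append_assoc] using this
    · -- k1 x = 1 : insert into the third bucket
      rw [hfil 3, hfil 2, hfil 1, hfil 0]
      simp only [hv]
      norm_num
      rw [sorted_rev_append_singleton]
      have := insertBy_split
        (fun a b => decide (k1 b < k1 a) || (!decide (k1 a < k1 b) && decide (k2 b < k2 a)))
        (fun a b => decide (k2 b < k2 a)) x
        (PySem.List.sorted (List.filter (fun z => k1 z == 3) xs) k2 true ++
         PySem.List.sorted (List.filter (fun z => k1 z == 2) xs) k2 true)
        (PySem.List.sorted (List.filter (fun z => k1 z == 1) xs) k2 true)
        (PySem.List.sorted (List.filter (fun z => k1 z == 0) xs) k2 true)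
        (by intro y hy
            simp only [List.mem_append] at hy
            rcases hy with hy | hy
            · have := hmem 3 y hy; simp [hv, this]
            · have := hmem 2 y hy; simp [hv, this])
        (by intro y hy; have := hmem 1 y hy; simp [hv, this])
        (by intro y hy; have := hmem 0 y hy; simp [hv, this])
      simpa [List.append_assoc] using this
    · -- k1 x = 0 : insert into the last bucket
      rw [hfil 3, hfil 2, hfil 1, hfil 0]
      simp only [hv]
      norm_num
      rw [sorted_rev_append_singleton]
      have := insertBy_split
        (fun a b => decide (k1 b < k1 a) || (!decide (k1 a < k1 b) && decide (k2 b < k2 a)))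
        (fun a b => decide (k2 b < k2 a)) x
        (PySem.List.sorted (List.filter (fun z => k1 z == 3) xs) k2 true ++
         (PySem.List.sorted (List.filter (fun z => k1 z == 2) xs) k2 true ++
          PySem.List.sorted (List.filter (fun z => k1 z == 1) xs) k2 true))
        (PySem.List.sorted (List.filter (fun z => k1 z == 0) xs) k2 true)
        []
        (by intro y hy
            simp only [List.mem_append] at hy
            rcases hy with hy | hy | hy
            · have := hmem 3 y hy; simp [hv, this]
            · have := hmem 2 y hy; simp [hv, this]
            · have := hmem 1 y hy; simp [hv, this])
        (by intro y hy; have := hmem 0 y hy; simp [hv, this])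
        (by simp)
      simpa [List.append_assoc] using this

theorem gpB_range (f : String) : getPriorityB f = 3 ∨ getPriorityB f = 2 ∨ getPriorityB f = 1 ∨ getPriorityB f = 0 := by
  unfold getPriorityB; split_ifs <;> simp

-- ===== VERDICT (by name: the statement is the Claim_ definition above) =====
theorem prioritize_risk_factors_py_spec : Claim_equal_prioritize_risk_factors_py := by
  intro risk_factors _
  unfold Spec_prioritize_risk_factors_py
  unfold prioritize_risk_factors_py prioritize_risk_factors_py_alt
  rw [PySem.Dict.counter_eq_foldl]
  simp only [List.foldl_cons, List.foldl_nil, List.nil_append, gp_eq]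
  rw [sorted2_buckets
    ((risk_factors.foldl (fun d f => d.modify f 0 (· + 1)) (PySem.Dict.empty : PySem.Dict String Int)).items)
    (fun x => getPriorityB x.1) (fun x => x.2) (fun x _ => gpB_range x.1)]
  simp [List.append_assoc]
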